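-- pv_equiv track=rewrite | github.com/mgtezak/Advent-of-Code-Puzzle-Solver | lib/solutions/aoc2016.py | aoc2016_day13_part2
-- ===== SOURCE A (Python) =====
-- from collections import deque
--
-- def aoc2016_day13_part2(puzzle_input):
--     puzzle_input = int(puzzle_input)
--
--     def is_wall(x, y):
--         result = x*x + 3*x + 2*x*y + y + y*y + puzzle_input
--         return bool(bin(result).count('1') % 2)
--
--     visited = {(1, 1)}
--     q = deque([(1, 1, 50)])
--     while q:
--         x, y, steps = q.popleft()
--         if not steps:
--             continue
--         for i, j in {(x+1, y), (x-1, y), (x, y+1), (x, y-1)} - visited: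
--             if i < 0 or j < 0 or is_wall(i, j):
--                 continue
--             q.append((i, j, steps-1))
--             visited.add((i, j))
--
--     return len(visited)
-- ===== SOURCE B (Python) =====
-- def aoc2016_day13_part2(puzzle_input):
--     n = int(puzzle_input)
--
--     def is_open(x, y):
--         return bin(x*x + 3*x + 2*x*y + y + y*y + n).count('1') % 2 == 0
--
--     # Any cell at most 50 steps from (1, 1) has 0 <= x, y <= 51, so work on a
--     # fixed 52x52 boolean grid: reach[x][y] = "within k steps" after sweep k.
--     SIZE = 52
--     reach = [[x == 1 and y == 1 for y in range(SIZE)] for x in range(SIZE)]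
--     for _ in range(50):
--         reach = [[reach[x][y]
--                   or (is_open(x, y)
--                       and any(0 <= i < SIZE and 0 <= j < SIZE and reach[i][j]
--                               for i, j in ((x+1, y), (x-1, y), (x, y+1), (x, y-1))))
--                   for y in range(SIZE)]
--                  for x in range(SIZE)]
--     return sum(map(sum, reach))
-- ===== Notes on version B (the rewrite author's own statement) =====
-- stated objective: alternative
-- what changed: Replaces A's deque BFS (visited set plus queue of (x,y,steps) entries) by dense dynamic programming on a fixed 52x52 boolean grid: 50 Jacobi-style whole-grid sweeps of reach[x][y] |= open(x,y) and some-neighbour-reachable, then summing the grid; no queue, no visited set, no per-node step counter.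
import Mathlib
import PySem

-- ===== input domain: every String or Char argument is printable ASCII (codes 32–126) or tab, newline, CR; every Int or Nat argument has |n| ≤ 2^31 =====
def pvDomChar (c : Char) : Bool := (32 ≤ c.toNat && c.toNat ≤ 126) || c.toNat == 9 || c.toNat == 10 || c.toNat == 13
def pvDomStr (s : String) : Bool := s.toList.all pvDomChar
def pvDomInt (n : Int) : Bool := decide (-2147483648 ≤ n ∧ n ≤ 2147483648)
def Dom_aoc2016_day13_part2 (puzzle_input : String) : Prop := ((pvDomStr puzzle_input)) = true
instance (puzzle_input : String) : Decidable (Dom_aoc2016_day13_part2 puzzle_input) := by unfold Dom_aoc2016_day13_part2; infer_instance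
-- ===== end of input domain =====

-- B replaces A's deque BFS (visited set + queue of (x,y,steps)) by dense dynamic programming on
-- a fixed 52×52 boolean grid: 50 Jacobi sweeps of reach[x][y] |= open(x,y) ∧ some neighbour
-- reachable, then a grid count; same return value (objective: alternative).

-- ===== PORT A =====

-- is_wall(x, y): bin(result).count('1') is PySem.Int.bitCount (Python-exact on negatives)
def pvIsWall (pin x y : Int) : Bool :=
  let result := x*x + 3*x + 2*x*y + y + y*y + pin
  PySem.Int.bitCount result % 2 == 1

-- the Python set literal {(x+1,y), (x-1,y), (x,y+1), (x,y-1)} (four distinct cells)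
def pvNbrs (x y : Int) : List (Int × Int) := [(x+1,y), (x-1,y), (x,y+1), (x,y-1)]

-- the body of A's 'for i, j in {…} - visited' loop for one popped (x, y, steps).
-- Python iterates that difference set in hash order; len(visited) does not depend on the
-- order, so the port iterates it in insertion order (PySem.Set.diff).
def pvPopStep (pin x y steps : Int) (q : List (Int × Int × Int)) (v : PySem.Set (Int × Int)) :
    List (Int × Int × Int) × PySem.Set (Int × Int) :=
  (PySem.Set.diff (PySem.Set.ofList (pvNbrs x y)) v).foldl
    (fun st c =>
      if c.1 < 0 || c.2 < 0 || pvIsWall pin c.1 c.2 then st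
      else (st.1 ++ [(c.1, c.2, steps - 1)], PySem.Set.add st.2 c)) (q, v)

-- fuel bound for A's while loop: pvFuelBound r n pops suffice for a level of ≤ n entries
-- with r further expansion rounds (each level at most quadruples); used only for termination,
-- the loop always ends by exhausting its queue first (proved below)
def pvFuelBound : Nat → Nat → Nat
  | 0, n => n
  | r+1, n => n + pvFuelBound r (4*n)

-- A's 'while q:' loop; fuel is a termination device only
def pvLoopA (pin : Int) : Nat → List (Int × Int × Int) → PySem.Set (Int × Int) → PySem.Set (Int × Int)
  | 0, _, v => v
  | _+1, [], v => v
  | fuel+1, (x, y, steps) :: q, v =>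
      if steps == 0 then pvLoopA pin fuel q v
      else
        let st := pvPopStep pin x y steps q v
        pvLoopA pin fuel st.1 st.2

def aoc2016_day13_part2 (puzzle_input : String) : Int :=
  match PySem.Int.ofStr? puzzle_input with
  | none => 0   -- int() raises ValueError here; excluded by Pre_
  | some pin =>
      (PySem.Set.len (pvLoopA pin (1 + pvFuelBound 49 4) [(1, 1, 50)]
        (PySem.Set.ofList [(1, 1)])) : Int)

-- ===== PORT B =====

-- is_open(x, y)
def pvOpen (pin x y : Int) : Bool :=
  PySem.Int.bitCount (x*x + 3*x + 2*x*y + y + y*y + pin) % 2 == 0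

-- reach[i][j]; B only reads it under the guard 0 ≤ i,j < 52, where pyGet? is in range
def pvAt (g : List (List Bool)) (i j : Int) : Bool :=
  (PySem.List.pyGet? ((PySem.List.pyGet? g i).getD []) j).getD false

-- one sweep: the nested comprehension building the next 52×52 grid
def pvStepGrid (pin : Int) (g : List (List Bool)) : List (List Bool) :=
  (PySem.List.pyRange 0 52 1).map (fun x =>
    (PySem.List.pyRange 0 52 1).map (fun y =>
      pvAt g x y ||
        (pvOpen pin x y &&
          ([(x+1,y), (x-1,y), (x,y+1), (x,y-1)] : List (Int × Int)).any
            (fun c => decide (0 ≤ c.1) && decide (c.1 < 52) && decide (0 ≤ c.2) &&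
                      decide (c.2 < 52) && pvAt g c.1 c.2))))

-- the initial grid [[x == 1 and y == 1 for y in range(52)] for x in range(52)]
def pvGrid0 : List (List Bool) :=
  (PySem.List.pyRange 0 52 1).map (fun x =>
    (PySem.List.pyRange 0 52 1).map (fun y => x == 1 && y == 1))

-- 'for _ in range(50): reach = step(reach)'
def pvIterGrid (pin : Int) : Nat → List (List Bool) → List (List Bool)
  | 0, g => g
  | k+1, g => pvIterGrid pin k (pvStepGrid pin g)

-- sum(row) over a list of booleans
def pvRowSum (row : List Bool) : Int :=
  row.foldl (fun a b => a + (if b then 1 else 0)) 0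

def aoc2016_day13_part2_alt (puzzle_input : String) : Int :=
  match PySem.Int.ofStr? puzzle_input with
  | none => 0
  | some pin =>
      (pvIterGrid pin 50 pvGrid0).foldl (fun a row => a + pvRowSum row) 0

-- ===== PRECONDITION & SPEC =====
-- Pre_ excludes exactly the strings on which int(puzzle_input) raises ValueError.
def Pre_aoc2016_day13_part2 (puzzle_input : String) : Prop :=
  (PySem.Int.ofStr? puzzle_input).isSome = true
instance (puzzle_input : String) : Decidable (Pre_aoc2016_day13_part2 puzzle_input) := by
  unfold Pre_aoc2016_day13_part2; infer_instance

def pvWitness_aoc2016_day13_part2 : String := "10"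

def Spec_aoc2016_day13_part2 (puzzle_input : String) (out : Int) : Prop := out = aoc2016_day13_part2_alt puzzle_input
instance (puzzle_input : String) (out : Int) : Decidable (Spec_aoc2016_day13_part2 puzzle_input out) := by unfold Spec_aoc2016_day13_part2; infer_instance

-- ===== CLAIM (what is proved, stated in full; the proofs are below) =====
def Claim_equal_aoc2016_day13_part2 : Prop := ∀ (puzzle_input : String), Dom_aoc2016_day13_part2 puzzle_input → Pre_aoc2016_day13_part2 puzzle_input → Spec_aoc2016_day13_part2 puzzle_input (aoc2016_day13_part2 puzzle_input)

-- ===== LEMMAS AND PROOFS =====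

-- ---------- proof-side helpers: a level-synchronous view of A's BFS ----------

-- a cell passes A's filters iff it is a fresh, in-bounds, open cell
def pvGood (pin : Int) (v : PySem.Set (Int × Int)) (c : Int × Int) : Bool :=
  !(PySem.Set.contains v c) && !(c.1 < 0 || c.2 < 0 || pvIsWall pin c.1 c.2)

-- in-bounds and open (the visited-independent part of pvGood)
def pvOk (pin : Int) (c : Int × Int) : Bool :=
  !(c.1 < 0 || c.2 < 0 || pvIsWall pin c.1 c.2)

-- embed a frontier cell as a queue entry carrying the step budget s
def pvEnt (s : Nat) (c : Int × Int) : Int × Int × Int := (c.1, c.2, (s : Int))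

-- scan the four neighbours of one frontier cell, growing (visited, next_frontier)
def pvStepCell (pin : Int) (st : PySem.Set (Int × Int) × List (Int × Int)) (c : Int × Int) :
    PySem.Set (Int × Int) × List (Int × Int) :=
  (pvNbrs c.1 c.2).foldl
    (fun st n =>
      if 0 ≤ n.1 && 0 ≤ n.2 && !(PySem.Set.contains st.1 n) && !(pvIsWall pin n.1 n.2)
      then (PySem.Set.add st.1 n, st.2 ++ [n]) else st) st

-- the level-synchronous reformulation of A's loop (proof device)
def pvRounds (pin : Int) : Nat → PySem.Set (Int × Int) → List (Int × Int) → PySem.Set (Int × Int)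
  | 0, v, _ => v
  | r+1, v, frontier =>
      let st := frontier.foldl (pvStepCell pin) (v, [])
      if st.2.isEmpty then st.1 else pvRounds pin r st.1 st.2

theorem pvNbrs_nodup (x y : Int) : (pvNbrs x y).Nodup := by
  simp [pvNbrs, Prod.ext_iff]
  omega

theorem pvPopFold (pin steps : Int) :
    ∀ (l : List (Int × Int)) (q : List (Int × Int × Int)) (v : PySem.Set (Int × Int)),
      l.foldl
        (fun st c =>
          if c.1 < 0 || c.2 < 0 || pvIsWall pin c.1 c.2 then st
          else (st.1 ++ [(c.1, c.2, steps - 1)], PySem.Set.add st.2 c)) (q, v) =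
      (q ++ (l.filter (fun c => !(c.1 < 0 || c.2 < 0 || pvIsWall pin c.1 c.2))).map
          (fun c => (c.1, c.2, steps - 1)),
       (l.filter (fun c => !(c.1 < 0 || c.2 < 0 || pvIsWall pin c.1 c.2))).foldl PySem.Set.add v) := by
  intro l
  induction l with
  | nil => intro q v; simp
  | cons c l ih =>
      intro q v
      cases h : (decide (c.1 < 0) || decide (c.2 < 0) || pvIsWall pin c.1 c.2)
      · simp only [List.foldl_cons, List.filter_cons]
        rw [if_neg (by simp [h]), ih, h]
        simp
      · simp only [List.foldl_cons, List.filter_cons]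
        rw [if_pos h, ih, h]
        simp

-- the two filters A applies (set difference first, bounds/wall second) compose to pvGood
theorem pvFilter_pop (pin : Int) (v : PySem.Set (Int × Int)) (l : List (Int × Int)) :
    ((l.filter (fun c => !(PySem.Set.contains v c))).filter
        (fun c => !(c.1 < 0 || c.2 < 0 || pvIsWall pin c.1 c.2))) = l.filter (pvGood pin v) := by
  rw [List.filter_filter]
  exact List.filter_congr (fun c _ => by simp [pvGood, Bool.and_comm])

theorem pvPopStep_eq (pin x y steps : Int) (q : List (Int × Int × Int))
    (v : PySem.Set (Int × Int)) :
    pvPopStep pin x y steps q v =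
      (q ++ ((pvNbrs x y).filter (pvGood pin v)).map (fun c => (c.1, c.2, steps - 1)),
       ((pvNbrs x y).filter (pvGood pin v)).foldl PySem.Set.add v) := by
  unfold pvPopStep
  have hdiff : PySem.Set.diff (PySem.Set.ofList (pvNbrs x y)) v
      = (pvNbrs x y).filter (fun c => !(PySem.Set.contains v c)) := by
    simp [PySem.Set.ofList_eq_self_of_nodup (xs := pvNbrs x y) (pvNbrs_nodup x y), PySem.Set.diff]
  rw [hdiff, pvPopFold, pvFilter_pop pin v (pvNbrs x y)]

-- the level scan's acceptance test equals pvGood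
theorem pvGood_cell (pin : Int) (v : PySem.Set (Int × Int)) (c : Int × Int) :
    (0 ≤ c.1 && 0 ≤ c.2 && !(PySem.Set.contains v c) && !(pvIsWall pin c.1 c.2)) = pvGood pin v c := by
  unfold pvGood
  cases hc : PySem.Set.contains v c <;> cases hw : pvIsWall pin c.1 c.2 <;>
    cases h1 : decide (c.1 < 0) <;> cases h2 : decide (c.2 < 0) <;> simp_all

-- the neighbour scan with an evolving visited set, characterised against the initial set
theorem pvCellFold (pin : Int) :
    ∀ (l : List (Int × Int)), l.Nodup →
    ∀ (v : PySem.Set (Int × Int)) (nf : List (Int × Int)),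
      l.foldl
        (fun st n =>
          if 0 ≤ n.1 && 0 ≤ n.2 && !(PySem.Set.contains st.1 n) && !(pvIsWall pin n.1 n.2)
          then (PySem.Set.add st.1 n, st.2 ++ [n]) else st) (v, nf) =
      ((l.filter (pvGood pin v)).foldl PySem.Set.add v, nf ++ l.filter (pvGood pin v)) := by
  intro l
  induction l with
  | nil => intro _ v nf; simp
  | cons c l ih =>
      intro hnd v nf
      have hcmem : c ∉ l := (List.nodup_cons.mp hnd).1
      have hnd' : l.Nodup := (List.nodup_cons.mp hnd).2
      by_cases h : pvGood pin v c = true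
      · have hcond : (0 ≤ c.1 && 0 ≤ c.2 && !(PySem.Set.contains v c) && !(pvIsWall pin c.1 c.2)) = true := by
          rw [pvGood_cell]; exact h
        have hfil : l.filter (pvGood pin (PySem.Set.add v c)) = l.filter (pvGood pin v) := by
          refine List.filter_congr (fun d hd => ?_)
          have hdc : d ≠ c := fun he => hcmem (he ▸ hd)
          simp [pvGood, PySem.Set.mem_add, hdc]
        simp only [List.foldl_cons, hcond, if_true]
        rw [ih hnd' (PySem.Set.add v c) (nf ++ [c])]
        simp [hfil, h]
      · have hcond : (0 ≤ c.1 && 0 ≤ c.2 && !(PySem.Set.contains v c) && !(pvIsWall pin c.1 c.2)) = false := by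
          rw [pvGood_cell]; simpa using h
        simp only [List.foldl_cons, hcond]
        rw [if_neg (by simp), ih hnd' v nf]
        simp [h]

theorem pvStepCell_eq (pin : Int) (v : PySem.Set (Int × Int)) (nf : List (Int × Int))
    (c : Int × Int) :
    pvStepCell pin (v, nf) c =
      (((pvNbrs c.1 c.2).filter (pvGood pin v)).foldl PySem.Set.add v,
       nf ++ (pvNbrs c.1 c.2).filter (pvGood pin v)) := by
  unfold pvStepCell
  exact pvCellFold pin (pvNbrs c.1 c.2) (pvNbrs_nodup c.1 c.2) v nf

theorem pvFuelBound_mono (r : Nat) : ∀ {m n : Nat}, m ≤ n → pvFuelBound r m ≤ pvFuelBound r n := by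
  induction r with
  | zero => intro m n h; exact h
  | succ r ih => intro m n h; simpa [pvFuelBound] using Nat.add_le_add h (ih (by omega))

-- draining a steps-0 level just pops every entry
theorem pvLoopA_drain (pin : Int) :
    ∀ (l : List (Int × Int)) (fuel : Nat) (v : PySem.Set (Int × Int)),
      l.length ≤ fuel → pvLoopA pin fuel (l.map (pvEnt 0)) v = v := by
  intro l
  induction l with
  | nil => intro fuel v _; cases fuel <;> simp [pvLoopA]
  | cons c l ih =>
      intro fuel v h
      cases fuel with
      | zero => simp at h
      | succ fuel => simpa [pvLoopA, pvEnt] using ih fuel v (by simpa using h)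

-- the key alignment, one level: A's queue, mid-level, holds the rest of the current level
-- (budget s'+1) followed by the already-discovered next level (budget s'); assuming the next
-- level is aligned (hnil), A's loop computes the remaining level-synchronous rounds
theorem pvInner (pin : Int) (s' : Nat)
    (hnil : ∀ (new : List (Int × Int)) (v : PySem.Set (Int × Int)) (fuel : Nat),
      pvFuelBound s' new.length ≤ fuel →
      pvLoopA pin fuel (new.map (pvEnt s')) v =
        if new.isEmpty then v else pvRounds pin s' v new) :
    ∀ (F new : List (Int × Int)) (v : PySem.Set (Int × Int)) (fuel : Nat),
      F.length + pvFuelBound s' (new.length + 4 * F.length) ≤ fuel →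
      pvLoopA pin fuel (F.map (pvEnt (s' + 1)) ++ new.map (pvEnt s')) v =
        (let st := F.foldl (pvStepCell pin) (v, new)
         if st.2.isEmpty then st.1 else pvRounds pin s' st.1 st.2) := by
  intro F
  induction F with
  | nil =>
      intro new v fuel hf
      simp only [List.map_nil, List.nil_append, List.foldl_nil]
      exact hnil new v fuel (by simpa using hf)
  | cons c F ih =>
      intro new v fuel hf
      cases fuel with
      | zero => exact absurd hf (by simp)
      | succ f =>
          have hz : ¬ ((((s' + 1 : Nat)) : Int) == 0) = true := by simp only [beq_iff_eq]; omega
          have hmap : (fun d : Int × Int => (d.1, d.2, ((s' + 1 : Nat) : Int) - 1)) = pvEnt s' := by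
            funext d
            simp only [pvEnt, Prod.mk.injEq, true_and]
            push_cast
            ring
          have hlen : ((pvNbrs c.1 c.2).filter (pvGood pin v)).length ≤ 4 := by
            simpa [pvNbrs] using List.length_filter_le (pvGood pin v) (pvNbrs c.1 c.2)
          have hmono := pvFuelBound_mono s'
            (m := (new ++ (pvNbrs c.1 c.2).filter (pvGood pin v)).length + 4 * F.length)
            (n := new.length + 4 * (F.length + 1)) (by simp only [List.length_append]; omega)
          simp only [List.map_cons, List.cons_append, pvLoopA, pvEnt]
          rw [if_neg hz, pvPopStep_eq, hmap, List.append_assoc, ← List.map_append,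
            ih (new ++ (pvNbrs c.1 c.2).filter (pvGood pin v)) _ f
              (by simp only [List.length_cons] at hf; omega)]
          simp only [List.foldl_cons]
          rw [pvStepCell_eq]

-- at the start of a level, A's remaining queue is exactly the current frontier
theorem pvNil (pin : Int) :
    ∀ (s' : Nat) (new : List (Int × Int)) (v : PySem.Set (Int × Int)) (fuel : Nat),
      pvFuelBound s' new.length ≤ fuel →
      pvLoopA pin fuel (new.map (pvEnt s')) v =
        if new.isEmpty then v else pvRounds pin s' v new := by
  intro s'
  induction s' with
  | zero =>
      intro new v fuel h
      rw [pvLoopA_drain pin new fuel v h]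
      cases new <;> simp [pvRounds]
  | succ s' ih =>
      intro new v fuel h
      cases new with
      | nil => cases fuel <;> simp [pvLoopA]
      | cons a new' =>
          have hb : (a :: new').length +
              pvFuelBound s' (([] : List (Int × Int)).length + 4 * (a :: new').length) ≤ fuel := by
            simpa [pvFuelBound] using h
          have := pvInner pin s' ih (a :: new') [] v fuel hb
          simp only [List.map_nil, List.append_nil] at this
          rw [this]
          simp [pvRounds]

-- ---------- the "within k steps" predicate and its basic theory ----------

-- pvWn pin k c: c is within k steps of (1, 1) through in-bounds open cells
-- ((1, 1) itself unconditionally, as in both programs)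
def pvWn (pin : Int) : Nat → (Int × Int) → Prop
  | 0 => fun c => c = (1, 1)
  | k+1 => fun c => pvWn pin k c ∨ (pvOk pin c = true ∧ ∃ d ∈ pvNbrs c.1 c.2, pvWn pin k d)

-- "within k-1 steps" (False at k = 0)
def pvPrevWn (pin : Int) : Nat → (Int × Int) → Prop
  | 0 => fun _ => False
  | k+1 => fun c => pvWn pin k c

theorem pvNbr_symm (c d : Int × Int) : d ∈ pvNbrs c.1 c.2 ↔ c ∈ pvNbrs d.1 d.2 := by
  simp [pvNbrs, Prod.ext_iff]
  omega

theorem pvWn_mono (pin : Int) {k m : Nat} (h : k ≤ m) {c : Int × Int} :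
    pvWn pin k c → pvWn pin m c := by
  induction m with
  | zero => intro hk; simpa [Nat.le_zero.mp h] using hk
  | succ m ih =>
      intro hk
      rcases Nat.lt_or_ge k (m+1) with hlt | hge
      · exact Or.inl (ih (by omega) hk)
      · have : k = m + 1 := by omega
        subst this; exact hk

theorem pvOk_nonneg (pin : Int) {c : Int × Int} (h : pvOk pin c = true) :
    0 ≤ c.1 ∧ 0 ≤ c.2 := by
  unfold pvOk at h
  constructor <;> by_contra hc <;> simp at h <;> omega

theorem pvWn_bound (pin : Int) :
    ∀ (k : Nat) (c : Int × Int), pvWn pin k c →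
      0 ≤ c.1 ∧ c.1 ≤ 1 + k ∧ 0 ≤ c.2 ∧ c.2 ≤ 1 + k := by
  intro k
  induction k with
  | zero =>
      intro c hc
      simp only [pvWn] at hc
      subst hc; norm_num
  | succ k ih =>
      intro c hc
      rcases hc with hc | ⟨hok, d, hadj, hd⟩
      · have := ih c hc; omega
      · have hb := ih d hd
        have hnn := pvOk_nonneg pin hok
        have : c.1 ≤ d.1 + 1 ∧ c.2 ≤ d.2 + 1 := by
          simp [pvNbrs, Prod.ext_iff] at hadj
          omega
        omega

theorem pvWn_stab (pin : Int) (j : Nat) (h : ∀ c, pvWn pin (j+1) c ↔ pvWn pin j c) :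
    ∀ (m : Nat) (c : Int × Int), pvWn pin (j + m) c ↔ pvWn pin j c := by
  intro m
  induction m with
  | zero => intro c; rfl
  | succ m ih =>
      intro c
      have : j + (m + 1) = (j + m) + 1 := by omega
      rw [this]
      constructor
      · rintro (hc | ⟨hok, d, hadj, hd⟩)
        · exact (ih c).mp hc
        · exact (h c).mp (Or.inr ⟨hok, d, hadj, (pvWn_mono pin (by omega) ((ih d).mp hd))⟩)
      · intro hc
        exact Or.inl ((ih c).mpr hc)

-- a good cell adjacent to a cell within k-1 steps is within k steps
theorem pvPrev_step (pin : Int) {j : Nat} {d e : Int × Int}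
    (he : pvPrevWn pin j e) (hd : pvOk pin d = true) (hadj : d ∈ pvNbrs e.1 e.2) :
    pvWn pin j d := by
  cases j with
  | zero => exact absurd he (by simp [pvPrevWn])
  | succ j =>
      exact Or.inr ⟨hd, e, (pvNbr_symm e d).mp hadj, he⟩

-- ---------- set-membership bookkeeping for the level fold ----------

theorem pvNodup_foldl_add {l : List (Int × Int)} :
    ∀ {v : PySem.Set (Int × Int)}, v.Nodup → (l.foldl PySem.Set.add v).Nodup := by
  induction l with
  | nil => intro v hv; simpa using hv
  | cons c l ih =>
      intro v hv
      exact ih (PySem.Set.nodup_add v c hv)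

theorem pvMem_foldl_add (l : List (Int × Int)) (v : PySem.Set (Int × Int)) (d : Int × Int) :
    d ∈ l.foldl PySem.Set.add v ↔ d ∈ v ∨ d ∈ l := by
  have := PySem.Set.mem_foldl_add (l := l) (f := fun b => b) (s := v) (y := d)
  simpa using this

theorem pvGood_iff (pin : Int) (v : PySem.Set (Int × Int)) (d : Int × Int) :
    pvGood pin v d = true ↔ d ∉ v ∧ pvOk pin d = true := by
  unfold pvGood pvOk
  simp

-- everything one whole-frontier fold produces, relative to its input
theorem pvFrontFold (pin : Int) :
    ∀ (F : List (Int × Int)) (v : PySem.Set (Int × Int)) (nf : List (Int × Int)),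
      v.Nodup → nf.Nodup → (∀ d ∈ nf, d ∈ v) →
      (F.foldl (pvStepCell pin) (v, nf)).1.Nodup ∧
      (F.foldl (pvStepCell pin) (v, nf)).2.Nodup ∧
      (∀ d ∈ (F.foldl (pvStepCell pin) (v, nf)).2, d ∈ (F.foldl (pvStepCell pin) (v, nf)).1) ∧
      (∀ d, d ∈ (F.foldl (pvStepCell pin) (v, nf)).1 ↔
        d ∈ v ∨ d ∈ (F.foldl (pvStepCell pin) (v, nf)).2) ∧
      (∀ d, d ∈ (F.foldl (pvStepCell pin) (v, nf)).2 ↔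
        d ∈ nf ∨ (d ∉ v ∧ pvOk pin d = true ∧ ∃ c ∈ F, d ∈ pvNbrs c.1 c.2)) := by
  intro F
  induction F with
  | nil =>
      intro v nf hv hnf hsub
      simp only [List.foldl_nil]
      refine ⟨hv, hnf, hsub, fun d => ⟨Or.inl, ?_⟩, fun d => ?_⟩
      · rintro (h | h)
        · exact h
        · exact hsub d h
      · simp
  | cons c F ih =>
      intro v nf hv hnf hsub
      rw [List.foldl_cons, pvStepCell_eq]
      set L := (pvNbrs c.1 c.2).filter (pvGood pin v) with hLdef
      set v' := L.foldl PySem.Set.add v with hv'def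
      have hmemv' : ∀ d, d ∈ v' ↔ d ∈ v ∨ d ∈ L := fun d => pvMem_foldl_add L v d
      have hLfresh : ∀ d ∈ L, d ∉ v ∧ pvOk pin d = true ∧ d ∈ pvNbrs c.1 c.2 := by
        intro d hd
        rcases List.mem_filter.mp hd with ⟨hmem, hgood⟩
        rcases (pvGood_iff pin v d).mp hgood with ⟨h1, h2⟩
        exact ⟨h1, h2, hmem⟩
      have hLnd : L.Nodup := (pvNbrs_nodup c.1 c.2).filter _
      have hv'nd : v'.Nodup := pvNodup_foldl_add hv
      have hnf' : (nf ++ L).Nodup := by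
        refine hnf.append hLnd ?_
        intro d hdnf hdL
        exact (hLfresh d hdL).1 (hsub d hdnf)
      have hsub' : ∀ d ∈ nf ++ L, d ∈ v' := by
        intro d hd
        rcases List.mem_append.mp hd with h | h
        · exact (hmemv' d).mpr (Or.inl (hsub d h))
        · exact (hmemv' d).mpr (Or.inr h)
      obtain ⟨h1, h2, h3, h4, h5⟩ := ih v' (nf ++ L) hv'nd hnf' hsub'
      refine ⟨h1, h2, h3, fun d => ?_, fun d => ?_⟩
      · rw [h4 d]
        constructor
        · rintro (hdv' | hds)
          · rcases (hmemv' d).mp hdv' with h | h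
            · exact Or.inl h
            · exact Or.inr ((h5 d).mpr (Or.inl (List.mem_append.mpr (Or.inr h))))
          · exact Or.inr hds
        · rintro (h | h)
          · exact Or.inl ((hmemv' d).mpr (Or.inl h))
          · exact Or.inr h
      · rw [h5 d]
        constructor
        · rintro (hd | ⟨hdv', hok, c', hc', hadj⟩)
          · rcases List.mem_append.mp hd with h | h
            · exact Or.inl h
            · obtain ⟨hnv, hok, hmem⟩ := hLfresh d h
              exact Or.inr ⟨hnv, hok, c, List.mem_cons_self .., hmem⟩
          · refine Or.inr ⟨fun hdv => hdv' ((hmemv' d).mpr (Or.inl hdv)), hok, c', ?_, hadj⟩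
            exact List.mem_cons_of_mem c hc'
        · rintro (hd | ⟨hnv, hok, c', hc', hadj⟩)
          · exact Or.inl (List.mem_append.mpr (Or.inl hd))
          · rcases List.mem_cons.mp hc' with rfl | hc'F
            · have hdL : d ∈ L := by
                rw [hLdef]
                exact List.mem_filter.mpr ⟨hadj, (pvGood_iff pin v d).mpr ⟨hnv, hok⟩⟩
              exact Or.inl (List.mem_append.mpr (Or.inr hdL))
            · by_cases hdv' : d ∈ v'
              · rcases (hmemv' d).mp hdv' with h | h
                · exact absurd h hnv
                · exact Or.inl (List.mem_append.mpr (Or.inr h))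
              · exact Or.inr ⟨hdv', hok, c', hc'F, hadj⟩

-- the level-synchronous rounds compute exactly "within j + r steps"
theorem pvRoundsWn (pin : Int) :
    ∀ (r j : Nat) (v : PySem.Set (Int × Int)) (F : List (Int × Int)),
      v.Nodup →
      (∀ d, d ∈ v ↔ pvWn pin j d) →
      (∀ d, d ∈ F ↔ (pvWn pin j d ∧ ¬ pvPrevWn pin j d)) →
      (pvRounds pin r v F).Nodup ∧ (∀ d, d ∈ pvRounds pin r v F ↔ pvWn pin (j + r) d) := by
  intro r
  induction r with
  | zero =>
      intro j v F hv hvm _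
      exact ⟨hv, fun d => by simpa using hvm d⟩
  | succ r ih =>
      intro j v F hv hvm hFm
      obtain ⟨h1, h2, h3, h4, h5⟩ := pvFrontFold pin F v [] hv (by simp) (by simp)
      set st := F.foldl (pvStepCell pin) (v, []) with hst
      have hv' : ∀ d, d ∈ st.1 ↔ pvWn pin (j+1) d := by
        intro d
        rw [h4 d]
        constructor
        · rintro (hd | hd)
          · exact pvWn_mono pin (Nat.le_succ j) ((hvm d).mp hd)
          · rcases (h5 d).mp hd with h | ⟨hnv, hok, c, hcF, hadj⟩
            · simp at h
            · exact Or.inr ⟨hok, c, (pvNbr_symm c d).mp hadj, ((hFm c).mp hcF).1⟩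
        · intro hd
          rcases hd with hd | ⟨hok, e, hadj, he⟩
          · exact Or.inl ((hvm d).mpr hd)
          · by_cases hdv : d ∈ v
            · exact Or.inl hdv
            · have hnWj : ¬ pvWn pin j d := fun h => hdv ((hvm d).mpr h)
              by_cases hprev : pvPrevWn pin j e
              · exact absurd (pvPrev_step pin hprev hok ((pvNbr_symm d e).mp hadj)) hnWj
              · have heF : e ∈ F := (hFm e).mpr ⟨he, hprev⟩
                exact Or.inr ((h5 d).mpr
                  (Or.inr ⟨hdv, hok, e, heF, (pvNbr_symm d e).mp hadj⟩))
      have hF' : ∀ d, d ∈ st.2 ↔ (pvWn pin (j+1) d ∧ ¬ pvPrevWn pin (j+1) d) := by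
        intro d
        constructor
        · intro hd
          rcases (h5 d).mp hd with h | ⟨hnv, hok, c, hcF, hadj⟩
          · simp at h
          · refine ⟨(hv' d).mp (h3 d hd), ?_⟩
            exact fun h => hnv ((hvm d).mpr h)
        · rintro ⟨hW, hP⟩
          rcases (h4 d).mp ((hv' d).mpr hW) with h | h
          · exact absurd ((hvm d).mp h) hP
          · exact h
      have hgoal : pvRounds pin (r+1) v F
          = if st.2.isEmpty then st.1 else pvRounds pin r st.1 st.2 := rfl
      rw [hgoal]
      by_cases hemp : st.2.isEmpty = true
      · rw [if_pos hemp]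
        have hstab : ∀ c, pvWn pin (j+1) c ↔ pvWn pin j c := by
          intro c
          constructor
          · intro h
            by_contra hn
            have hc : c ∈ st.2 := (hF' c).mpr ⟨h, hn⟩
            rw [List.isEmpty_iff] at hemp
            simp [hemp] at hc
          · exact pvWn_mono pin (Nat.le_succ j)
        have hs := pvWn_stab pin j hstab
        refine ⟨h1, fun d => ?_⟩
        rw [hv' d, hstab d, ← hs (r+1) d]
      · rw [if_neg hemp]
        have hadd : j + 1 + r = j + (r + 1) := by omega
        obtain ⟨hn, hm⟩ := ih (j+1) st.1 st.2 h1 hv' hF'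
        exact ⟨hn, fun d => by rw [hm d, hadd]⟩

-- ---------- the grid iteration computes the same predicate ----------

theorem pvPyGet?_map_pyRange {α : Type} (f : Int → α) (x : Int) (h0 : 0 ≤ x) (h : x < 52) :
    PySem.List.pyGet? ((PySem.List.pyRange 0 52 1).map f) x = some (f x) := by
  obtain ⟨n, rfl⟩ : ∃ n : Nat, x = (n : Int) := ⟨x.toNat, (Int.toNat_of_nonneg h0).symm⟩
  have hn : n < 52 := by exact_mod_cast h
  rw [PySem.List.pyRange_one]
  simp [hn]

theorem pvAt_build (g : Int → Int → Bool) (x y : Int)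
    (hx0 : 0 ≤ x) (hx : x < 52) (hy0 : 0 ≤ y) (hy : y < 52) :
    pvAt ((PySem.List.pyRange 0 52 1).map (fun i =>
      (PySem.List.pyRange 0 52 1).map (fun j => g i j))) x y = g x y := by
  unfold pvAt
  rw [pvPyGet?_map_pyRange _ x hx0 hx]
  simp only [Option.getD_some]
  rw [pvPyGet?_map_pyRange _ y hy0 hy]
  rfl

theorem pvIterGrid_succ' (pin : Int) :
    ∀ (k : Nat) (g : List (List Bool)),
      pvIterGrid pin (k+1) g = pvStepGrid pin (pvIterGrid pin k g) := by
  intro k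
  induction k with
  | zero => intro g; rfl
  | succ k ih =>
      intro g
      show pvIterGrid pin (k+1) (pvStepGrid pin g) = _
      rw [ih (pvStepGrid pin g)]
      rfl

theorem pvOpen_eq_not_wall (pin x y : Int) : pvOpen pin x y = !(pvIsWall pin x y) := by
  unfold pvOpen pvIsWall
  rcases Nat.mod_two_eq_zero_or_one
      (PySem.Int.bitCount (x*x + 3*x + 2*x*y + y + y*y + pin)) with h | h <;> simp [h]

theorem pvGridWn (pin : Int) :
    ∀ (k : Nat), k ≤ 50 → ∀ (x y : Int), 0 ≤ x → x < 52 → 0 ≤ y → y < 52 →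
      (pvAt (pvIterGrid pin k pvGrid0) x y = true ↔ pvWn pin k (x, y)) := by
  intro k
  induction k with
  | zero =>
      intro _ x y hx0 hx hy0 hy
      show pvAt pvGrid0 x y = true ↔ pvWn pin 0 (x, y)
      unfold pvGrid0
      rw [pvAt_build (fun i j => i == 1 && j == 1) x y hx0 hx hy0 hy]
      show (x == 1 && y == 1) = true ↔ (x, y) = (1, 1)
      simp [Prod.ext_iff]
  | succ k ih =>
      intro hk x y hx0 hx hy0 hy
      have hIH := ih (Nat.le_of_succ_le hk)
      rw [pvIterGrid_succ']
      set G := pvIterGrid pin k pvGrid0 with hG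
      show pvAt (pvStepGrid pin G) x y = true ↔ _
      unfold pvStepGrid
      rw [pvAt_build _ x y hx0 hx hy0 hy]
      have hok_open : pvOk pin (x, y) = true ↔ pvOpen pin x y = true := by
        simp [pvOk, pvOpen_eq_not_wall, show ¬ (x < 0) by omega, show ¬ (y < 0) by omega]
      simp only [Bool.or_eq_true, Bool.and_eq_true, List.any_eq_true]
      constructor
      · rintro (h | ⟨hopen, c, hc, hcond⟩)
        · exact Or.inl ((hIH x y hx0 hx hy0 hy).mp h)
        · simp only [decide_eq_true_eq] at hcond
          obtain ⟨⟨⟨⟨hc10, hc11⟩, hc20⟩, hc21⟩, hat⟩ := hcond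
          refine Or.inr ⟨(hok_open).mpr hopen, c, ?_, (hIH c.1 c.2 hc10 hc11 hc20 hc21).mp hat⟩
          simpa [pvNbrs] using hc
      · rintro (h | ⟨hok, d, hd, hwd⟩)
        · exact Or.inl ((hIH x y hx0 hx hy0 hy).mpr h)
        · have hb := pvWn_bound pin k d hwd
          have hd1 : d.1 < 52 := by omega
          have hd2 : d.2 < 52 := by omega
          refine Or.inr ⟨(hok_open).mp hok, d, by simpa [pvNbrs] using hd, ?_⟩
          simp only [decide_eq_true_eq]
          exact ⟨⟨⟨⟨hb.1, hd1⟩, hb.2.2.1⟩, hd2⟩,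
            (hIH d.1 d.2 hb.1 hd1 hb.2.2.1 hd2).mpr (by simpa using hwd)⟩

-- ---------- counting: |visited| = the grid sum ----------

theorem pvRowSum_eq (row : List Bool) : pvRowSum row = (row.countP (fun b => b) : Int) := by
  unfold pvRowSum
  rw [PySem.List.foldl_add (l := row) (g := fun b => if b then (1:Int) else 0)
        (a := 0)]
  rw [PySem.List.sum_map_ite_one_zero]
  simp

-- the 52×52 index box as a flat list of cells
def pvBox : List (Int × Int) :=
  (List.range 52).flatMap (fun (i : Nat) => (List.range 52).map (fun (j : Nat) => ((i : Int), (j : Int))))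


theorem pvCountP_flatMap {α β : Type} (p : β → Bool) (l : List α) (f : α → List β) :
    (l.flatMap f).countP p = (l.map (fun a => (f a).countP p)).sum := by
  induction l with
  | nil => simp
  | cons a l ih => simp [List.countP_append, ih]

theorem pvBox_mem (c : Int × Int) :
    c ∈ pvBox ↔ 0 ≤ c.1 ∧ c.1 < 52 ∧ 0 ≤ c.2 ∧ c.2 < 52 := by
  unfold pvBox
  constructor
  · intro hc
    simp only [List.mem_flatMap, List.mem_map, List.mem_range] at hc
    obtain ⟨i, hi, j, hj, rfl⟩ := hc
    constructor
    · simp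
    constructor
    · show ((i:Int), (j:Int)).1 < 52
      simp
      exact_mod_cast hi
    constructor
    · simp
    · show ((i:Int), (j:Int)).2 < 52
      simp
      exact_mod_cast hj
  · rintro ⟨h1, h2, h3, h4⟩
    simp only [List.mem_flatMap, List.mem_map, List.mem_range]
    refine ⟨c.1.toNat, by omega, c.2.toNat, by omega, ?_⟩
    rw [Int.toNat_of_nonneg h1, Int.toNat_of_nonneg h3]

theorem pvBox_nodup : pvBox.Nodup := by
  unfold pvBox
  rw [List.nodup_flatMap]
  constructor
  · intro i _
    refine List.Nodup.map ?_ List.nodup_range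
    intro a b h
    have h2 : ((a : Int)) = (b : Int) := congrArg Prod.snd h
    exact_mod_cast h2
  · refine List.Pairwise.imp ?_ (List.nodup_range (n := 52))
    intro i j hij c hc hc'
    simp only [List.mem_map, List.mem_range] at hc hc'
    obtain ⟨a, _, rfl⟩ := hc
    obtain ⟨b, _, h⟩ := hc'
    have h2 : (i : Int) = (j : Int) := (congrArg Prod.fst h).symm
    exact hij (by exact_mod_cast h2)

-- the row-sum of a built 52×52 grid counts the true cells of the box
theorem pvGridCount (g : Int → Int → Bool) :
    ((((PySem.List.pyRange 0 52 1).map (fun i =>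
        (PySem.List.pyRange 0 52 1).map (fun j => g i j))).map pvRowSum).sum)
      = ((pvBox.countP (fun c => g c.1 c.2)) : Int) := by
  rw [List.map_map]
  rw [PySem.List.pyRange_one]
  simp only [List.map_map, Function.comp_def, pvRowSum_eq, List.countP_map, pvBox,
    pvCountP_flatMap]
  rw [Nat.cast_list_sum, List.map_map]
  refine congrArg List.sum (List.map_congr_left ?_)
  intro i _
  simp

theorem pvCount (pin : Int) (S : PySem.Set (Int × Int)) (hnd : S.Nodup)
    (hmem : ∀ d, d ∈ S ↔ pvWn pin 50 d) :
    (PySem.Set.len S : Int) =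
      (pvIterGrid pin 50 pvGrid0).foldl (fun a row => a + pvRowSum row) 0 := by
  have hG : ∀ x y : Int, 0 ≤ x → x < 52 → 0 ≤ y → y < 52 →
      (pvAt (pvIterGrid pin 50 pvGrid0) x y = true ↔ pvWn pin 50 (x, y)) :=
    pvGridWn pin 50 le_rfl
  have hG50 : pvIterGrid pin 50 pvGrid0 = pvStepGrid pin (pvIterGrid pin 49 pvGrid0) :=
    pvIterGrid_succ' pin 49 pvGrid0
  -- the visited set is a permutation of the true box cells
  have hperm : S.Perm (pvBox.filter (fun c => pvAt (pvIterGrid pin 50 pvGrid0) c.1 c.2)) := by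
    refine (List.perm_ext_iff_of_nodup hnd (pvBox_nodup.filter _)).mpr (fun c => ?_)
    rw [hmem c, List.mem_filter, pvBox_mem]
    constructor
    · intro hc
      have hb := pvWn_bound pin 50 c hc
      have h1 : c.1 < 52 := by omega
      have h2 : c.2 < 52 := by omega
      exact ⟨⟨hb.1, h1, hb.2.2.1, h2⟩, (hG c.1 c.2 hb.1 h1 hb.2.2.1 h2).mpr (by simpa using hc)⟩
    · rintro ⟨⟨h1, h2, h3, h4⟩, hp⟩
      have := (hG c.1 c.2 h1 h2 h3 h4).mp hp
      simpa using this
  have hlen : S.length = (pvBox.filter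
      (fun c => pvAt (pvIterGrid pin 50 pvGrid0) c.1 c.2)).length := hperm.length_eq
  have hR : (pvIterGrid pin 50 pvGrid0).foldl (fun a row => a + pvRowSum row) 0
      = ((pvBox.countP (fun c => pvAt (pvIterGrid pin 50 pvGrid0) c.1 c.2)) : Int) := by
    conv_lhs => rw [hG50]
    unfold pvStepGrid
    rw [PySem.List.foldl_add (g := pvRowSum) (a := 0)]
    rw [zero_add, pvGridCount]
    refine congrArg (fun n : Nat => (n : Int)) (List.countP_congr (fun c hc => ?_))
    obtain ⟨h1, h2, h3, h4⟩ := (pvBox_mem c).mp hc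
    rw [hG50]
    unfold pvStepGrid
    rw [pvAt_build _ c.1 c.2 h1 h2 h3 h4]
  rw [hR]
  show (S.length : Int) = _
  rw [hlen, List.countP_eq_length_filter]



-- ===== VERDICT (by name: the statement is the Claim_ definition above) =====
theorem aoc2016_day13_part2_spec : Claim_equal_aoc2016_day13_part2 := by
  intro input _ hpre
  unfold Spec_aoc2016_day13_part2 aoc2016_day13_part2 aoc2016_day13_part2_alt
  cases hp : PySem.Int.ofStr? input with
  | none => rfl
  | some pin =>
      have h := pvInner pin 49 (pvNil pin 49) [(1, 1)] [] (PySem.Set.ofList [(1, 1)])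
        (1 + pvFuelBound 49 4) (by simp)
      have e1 : ([((1:Int), (1:Int))].map (pvEnt (49 + 1)) ++
          ([] : List (Int × Int)).map (pvEnt 49)) = [((1:Int), (1:Int), (50:Int))] := by
        simp [pvEnt]
      rw [e1] at h
      have h50 : pvRounds pin 50 (PySem.Set.ofList [(1, 1)]) [(1, 1)]
          = (let st := [((1:Int), (1:Int))].foldl (pvStepCell pin)
               (PySem.Set.ofList [(1, 1)], ([] : List (Int × Int)))
             if st.2.isEmpty then st.1 else pvRounds pin 49 st.1 st.2) := rfl
      have hA : pvLoopA pin (1 + pvFuelBound 49 4) [(1, 1, 50)] (PySem.Set.ofList [(1, 1)])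
          = pvRounds pin 50 (PySem.Set.ofList [(1, 1)]) [(1, 1)] := by
        rw [h, h50]
      obtain ⟨hnd, hmem⟩ := pvRoundsWn pin 50 0 (PySem.Set.ofList [(1, 1)]) [(1, 1)]
        (PySem.Set.nodup_ofList _)
        (fun d => by simp [PySem.Set.mem_ofList, pvWn])
        (fun d => by simp [pvWn, pvPrevWn])
      show PySem.Set.len (pvLoopA pin (1 + pvFuelBound 49 4) [(1, 1, 50)]
          (PySem.Set.ofList [(1, 1)]))
        = List.foldl (fun a row => a + pvRowSum row) 0 (pvIterGrid pin 50 pvGrid0)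
      rw [hA]
      exact pvCount pin _ hnd (fun d => by simpa using hmem d)
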